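-- pv_equiv track=rewrite | github.com/siddheshparab309/Fast-response-k-server-problem-using-DP- | k-server.py | compute_costs
-- ===== SOURCE A (Python) =====
-- def compute_costs(w):
--     n = len(w)
--     cost = [[0] * n for _ in range(n)]
--
--     prefix_w = [0] * (n + 1)
--     prefix_wi = [0] * (n + 1)
--
--     for i in range(1, n + 1):
--         prefix_w[i] = prefix_w[i - 1] + w[i - 1]
--         prefix_wi[i] = prefix_wi[i - 1] + w[i - 1] * i
--
--     for l in range(1, n + 1):
--         for r in range(l, n + 1):
--             mid = (l + r) // 2
--
--             wl = prefix_w[mid] - prefix_w[l - 1]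
--             wr = prefix_w[r]   - prefix_w[mid]
--             cl = wl * mid - (prefix_wi[mid] - prefix_wi[l - 1])
--             cr = (prefix_wi[r] - prefix_wi[mid]) - wr * mid
--
--             cost[l - 1][r - 1] = cl + cr
--
--     return cost
-- ===== SOURCE B (Python) =====
-- def compute_costs(w):
--     n = len(w)
--     cost = []
--     for l in range(1, n + 1):
--         row = []
--         for r in range(1, n + 1):
--             if r < l:
--                 row.append(0)
--             else:
--                 mid = (l + r) // 2
--                 c = 0
--                 for i in range(l, r + 1):
--                     c += w[i - 1] * abs(i - mid)
--                 row.append(c)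
--         cost.append(row)
--     return cost
-- ===== Notes on version B (the rewrite author's own statement) =====
-- stated objective: simpler
-- what changed: Drops the prefix_w/prefix_wi tables and their O(1) difference formulas; each cell is computed by a direct inner scan summing w[i-1]*abs(i-mid), and rows are built by appending instead of filling a preallocated zero matrix.
import Mathlib
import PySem

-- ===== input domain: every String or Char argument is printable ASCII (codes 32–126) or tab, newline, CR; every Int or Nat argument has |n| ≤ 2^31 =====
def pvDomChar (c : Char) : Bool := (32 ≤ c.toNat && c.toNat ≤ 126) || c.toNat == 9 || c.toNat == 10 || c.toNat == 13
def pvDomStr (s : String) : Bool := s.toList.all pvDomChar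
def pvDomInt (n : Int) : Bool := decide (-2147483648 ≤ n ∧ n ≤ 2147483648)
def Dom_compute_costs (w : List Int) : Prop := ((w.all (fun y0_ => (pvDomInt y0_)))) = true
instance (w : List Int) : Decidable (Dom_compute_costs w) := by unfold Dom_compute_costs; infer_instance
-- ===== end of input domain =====

-- B drops A's prefix_w/prefix_wi tables and computes each interval cost by a direct
-- inner scan summing w[i-1]*|i-mid| (simpler, no precomputation; not faster).

-- ===== PORT A =====
-- prefix_w[i] of A, built by the same recurrence prefix_w[i] = prefix_w[i-1] + w[i-1]
def prefW (w : List Int) : Nat → Int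
  | 0 => 0
  | i + 1 => prefW w i + w.getD i 0

-- prefix_wi[i] of A: prefix_wi[i] = prefix_wi[i-1] + w[i-1]*i
def prefWi (w : List Int) : Nat → Int
  | 0 => 0
  | i + 1 => prefWi w i + w.getD i 0 * ((i : Int) + 1)

-- the zero matrix with cell (l-1,r-1) overwritten for r ≥ l, as in A's fill loop
def compute_costs (w : List Int) : List (List Int) :=
  let n := w.length
  (List.range n).map (fun li =>
    (List.range n).map (fun ri =>
      if li ≤ ri then
        let l := li + 1
        let r := ri + 1
        let mid : Nat := (l + r) / 2
        let wl := prefW w mid - prefW w (l - 1)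
        let wr := prefW w r - prefW w mid
        let cl := wl * (mid : Int) - (prefWi w mid - prefWi w (l - 1))
        let cr := (prefWi w r - prefWi w mid) - wr * (mid : Int)
        cl + cr
      else 0))

-- ===== PORT B =====
def compute_costs_alt (w : List Int) : List (List Int) :=
  let n := w.length
  (List.range n).map (fun li =>
    (List.range n).map (fun ri =>
      if ri < li then 0
      else
        let l := li + 1
        let r := ri + 1
        let mid : Nat := (l + r) / 2
        (List.range' l (r + 1 - l)).foldl
          (fun c i => c + w.getD (i - 1) 0 * |(i : Int) - (mid : Int)|) 0))

-- ===== PRECONDITION & SPEC =====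
def Spec_compute_costs (w : List Int) (out : List (List Int)) : Prop := out = compute_costs_alt w
instance (w : List Int) (out : List (List Int)) : Decidable (Spec_compute_costs w out) := by unfold Spec_compute_costs; infer_instance

-- ===== CLAIM (what is proved, stated in full; the proofs are below) =====
def Claim_equal_compute_costs : Prop := ∀ (w : List Int), Dom_compute_costs w → Spec_compute_costs w (compute_costs w)

-- ===== LEMMAS AND PROOFS =====

-- A's "cl": the prefix-difference formula equals the left half of the direct sum
theorem lowSum (w : List Int) (m : Nat) (a b : Nat) (hab : a ≤ b) :
    (prefW w b - prefW w a) * (m : Int) - (prefWi w b - prefWi w a)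
      = ∑ i ∈ Finset.Ico a b, w.getD i 0 * ((m : Int) - ((i : Int) + 1)) := by
  induction b, hab using Nat.le_induction with
  | base => simp
  | succ b hab ih =>
    rw [Finset.sum_Ico_succ_top hab, ← ih]
    simp only [prefW, prefWi]
    ring

-- A's "cr": the prefix-difference formula equals the right half of the direct sum
theorem highSum (w : List Int) (m : Nat) (a b : Nat) (hab : a ≤ b) :
    (prefWi w b - prefWi w a) - (prefW w b - prefW w a) * (m : Int)
      = ∑ i ∈ Finset.Ico a b, w.getD i 0 * (((i : Int) + 1) - (m : Int)) := by
  induction b, hab using Nat.le_induction with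
  | base => simp
  | succ b hab ih =>
    rw [Finset.sum_Ico_succ_top hab, ← ih]
    simp only [prefW, prefWi]
    ring

-- B's inner fold is the sum of w[i]*|i+1-m| over the 0-based interval
theorem fold_abs (w : List Int) (m a : Nat) : ∀ (n : Nat) (c : Int),
    (List.range' (a + 1) n).foldl
        (fun c i => c + w.getD (i - 1) 0 * |(i : Int) - (m : Int)|) c
      = c + ∑ i ∈ Finset.Ico a (a + n), w.getD i 0 * |((i : Int) + 1) - (m : Int)| := by
  intro n
  induction n with
  | zero => simp
  | succ n ih =>
    intro c
    rw [List.range'_concat, List.foldl_append, ih]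
    simp only [List.foldl_cons, List.foldl_nil]
    have h1 : a + 1 + 1 * n - 1 = a + n := by omega
    have h2 : ((a + 1 + 1 * n : Nat) : Int) = ((a + n : Nat) : Int) + 1 := by push_cast; ring
    rw [h1, h2, ← add_assoc a n 1, Finset.sum_Ico_succ_top (Nat.le_add_right a n)]
    ring

-- the per-cell equality for a valid interval li ≤ ri
theorem cell_eq (w : List Int) (li ri : Nat) (h : li ≤ ri) :
    (let l := li + 1
     let r := ri + 1
     let mid : Nat := (l + r) / 2
     let wl := prefW w mid - prefW w (l - 1)
     let wr := prefW w r - prefW w mid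
     let cl := wl * (mid : Int) - (prefWi w mid - prefWi w (l - 1))
     let cr := (prefWi w r - prefWi w mid) - wr * (mid : Int)
     cl + cr)
      = (let l := li + 1
         let r := ri + 1
         let mid : Nat := (l + r) / 2
         (List.range' l (r + 1 - l)).foldl
           (fun c i => c + w.getD (i - 1) 0 * |(i : Int) - (mid : Int)|) 0) := by
  simp only []
  set mid := (li + 1 + (ri + 1)) / 2 with hmid
  have hlm : li ≤ mid := by omega
  have hmr : mid ≤ ri + 1 := by omega
  have hn : ri + 1 + 1 - (li + 1) = ri + 1 - li := by omega
  rw [hn, fold_abs w mid li (ri + 1 - li) 0]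
  have hend : li + (ri + 1 - li) = ri + 1 := by omega
  rw [hend, zero_add, ← Finset.sum_Ico_consecutive _ hlm hmr]
  have hsimp : li + 1 - 1 = li := by omega
  rw [hsimp, lowSum w mid li mid hlm, highSum w mid mid (ri + 1) hmr]
  congr 1
  · apply Finset.sum_congr rfl
    intro i hi
    rw [Finset.mem_Ico] at hi
    rw [abs_of_nonpos (by omega : ((i : Int) + 1) - (mid : Int) ≤ 0)]
    ring
  · apply Finset.sum_congr rfl
    intro i hi
    rw [Finset.mem_Ico] at hi
    rw [abs_of_nonneg (by omega : (0 : Int) ≤ ((i : Int) + 1) - (mid : Int))]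

-- ===== VERDICT (by name: the statement is the Claim_ definition above) =====
theorem compute_costs_spec : Claim_equal_compute_costs := by
  intro w _
  show compute_costs w = compute_costs_alt w
  unfold compute_costs compute_costs_alt
  apply List.map_congr_left
  intro li _
  apply List.map_congr_left
  intro ri _
  by_cases h : li ≤ ri
  · rw [if_pos h, if_neg (by omega : ¬ ri < li)]
    exact cell_eq w li ri h
  · rw [if_neg h, if_pos (by omega : ri < li)]
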